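-- pv_equiv track=rewrite | github.com/David-Jing/AutoPPTMaker | AutoPPTMaker/ListMaker.py | setLinesPerSlideRestriction
-- ===== SOURCE A (Python) =====
-- from typing import Any, List
--
-- def setLinesPerSlideRestriction(lineLengthRestrictedContent: List[List[str]], maxLinesPerSlide: int) -> List[List[Any]]:
--     # Use greedy method to fill slides
--     slideContentList = []
--     listStartIndex = []
--
--     currLines = -1  # Offset initial paragraph spacing
--     currIndex = 0
--     currContentList = []
--     currListStartIndex = []
--     for content in lineLengthRestrictedContent:
--         contentStr = "".join(content)
--
--         if len(content) + currLines + 1 < maxLinesPerSlide: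
--             currContentList.append(contentStr)
--             currListStartIndex.append(currIndex)
--
--             currLines += 1
--         else:
--             currLines = -1
--
--             slideContentList.append("".join(currContentList))
--             listStartIndex.append(currListStartIndex)
--
--             currContentList = [contentStr]
--             currListStartIndex = [0]
--             currIndex = 0
--
--         currIndex += len(contentStr)
--         currLines += len(content)
--
--     # Append remaining currContentList
--     if len(currContentList) > 0:
--         slideContentList.append("".join(currContentList))
--         listStartIndex.append(currListStartIndex)
--
--     return [slideContentList, listStartIndex]
-- ===== SOURCE B (Python) =====
-- from typing import Any, List
--
-- def setLinesPerSlideRestriction(lineLengthRestrictedContent: List[List[str]], maxLinesPerSlide: int) -> List[List[Any]]: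
--     # Phase 1: greedily group paragraphs into slides (same overflow rule as before)
--     groups = []
--     curr = []
--     currLines = -1
--     for content in lineLengthRestrictedContent:
--         if len(content) + currLines + 1 < maxLinesPerSlide:
--             curr.append(content)
--             currLines += 1 + len(content)
--         else:
--             groups.append(curr)
--             curr = [content]
--             currLines = -1 + len(content)
--     if lineLengthRestrictedContent:
--         groups.append(curr)
--
--     # Phase 2: render each group into its slide string and per-slide start indices
--     slides = []
--     starts = []
--     for g in groups:
--         paras = ["".join(p) for p in g]
--         idxs = []
--         pos = 0
--         for s in paras:
--             idxs.append(pos)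
--             pos += len(s)
--         slides.append("".join(paras))
--         starts.append(idxs)
--     return [slides, starts]
-- ===== Notes on version B (the rewrite author's own statement) =====
-- stated objective: alternative
-- what changed: Replaced A's single loop that interleaves grouping, string joining and index bookkeeping over six pieces of mutable state with a two-phase design: first a grouping pass that only decides which paragraphs go on which slide, then a separate rendering pass that joins each group and computes its cumulative start indices.
import Mathlib
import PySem

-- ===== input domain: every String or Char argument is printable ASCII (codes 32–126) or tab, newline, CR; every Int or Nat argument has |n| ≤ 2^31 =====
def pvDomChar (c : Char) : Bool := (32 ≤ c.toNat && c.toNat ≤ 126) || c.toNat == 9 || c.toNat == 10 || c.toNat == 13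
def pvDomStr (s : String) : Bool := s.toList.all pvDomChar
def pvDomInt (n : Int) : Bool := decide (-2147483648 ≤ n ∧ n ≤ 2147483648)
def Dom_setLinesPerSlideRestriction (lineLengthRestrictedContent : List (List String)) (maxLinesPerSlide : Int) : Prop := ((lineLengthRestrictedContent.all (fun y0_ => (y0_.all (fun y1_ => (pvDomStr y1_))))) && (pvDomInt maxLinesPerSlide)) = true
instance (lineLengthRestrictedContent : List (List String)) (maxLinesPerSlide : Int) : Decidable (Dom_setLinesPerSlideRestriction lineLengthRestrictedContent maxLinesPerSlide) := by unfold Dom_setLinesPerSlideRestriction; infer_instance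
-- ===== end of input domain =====

-- B replaces A's single six-variable loop by a grouping pass followed by a separate rendering pass
-- (same cost; the objective is the cleaner decomposition). Return values agree on all inputs.

-- ===== PORT A =====
-- the for-loop of A, over the same state (slides, starts, currLines, currIndex, currContentList, currListStartIndex);
-- the trailing flush ('if len(currContentList) > 0') is the [] case
def pvLoopA (m : Int) (xs : List (List String))
    (slides : List String) (starts : List (List Int)) (currLines currIndex : Int)
    (currCL : List String) (currSI : List Int) : List String × List (List Int) :=
  match xs with
  | [] =>
    if currCL.length > 0 then (slides ++ [PySem.Str.join "" currCL], starts ++ [currSI])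
    else (slides, starts)
  | content :: rest =>
    let contentStr := PySem.Str.join "" content
    if (content.length : Int) + currLines + 1 < m then
      pvLoopA m rest slides starts (currLines + 1 + content.length)
        (currIndex + (PySem.Str.len contentStr : Int))
        (currCL ++ [contentStr]) (currSI ++ [currIndex])
    else
      pvLoopA m rest (slides ++ [PySem.Str.join "" currCL]) (starts ++ [currSI])
        (-1 + content.length) ((PySem.Str.len contentStr : Int))
        [contentStr] [0]

def setLinesPerSlideRestriction (lineLengthRestrictedContent : List (List String)) (maxLinesPerSlide : Int) : List String × List (List Int) :=
  pvLoopA maxLinesPerSlide lineLengthRestrictedContent [] [] (-1) 0 [] []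

-- ===== PORT B =====
-- phase 1: the grouping loop of Source B
def pvGroupB (m : Int) (xs : List (List String))
    (groups : List (List (List String))) (curr : List (List String)) (currLines : Int) :
    List (List (List String)) × List (List String) :=
  match xs with
  | [] => (groups, curr)
  | content :: rest =>
    if (content.length : Int) + currLines + 1 < m then
      pvGroupB m rest groups (curr ++ [content]) (currLines + 1 + content.length)
    else
      pvGroupB m rest (groups ++ [curr]) [content] (-1 + content.length)

-- the inner index loop of phase 2 (idxs/pos over paras)
def pvIdx (paras : List String) : List Int × Int :=
  paras.foldl (fun st s => (st.1 ++ [st.2], st.2 + (PySem.Str.len s : Int))) ([], 0)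

-- the body of phase 2 for one group
def pvRender (g : List (List String)) : String × List Int :=
  let paras := g.map (PySem.Str.join "")
  (PySem.Str.join "" paras, (pvIdx paras).1)

def setLinesPerSlideRestriction_alt (lineLengthRestrictedContent : List (List String)) (maxLinesPerSlide : Int) : List String × List (List Int) :=
  let r := pvGroupB maxLinesPerSlide lineLengthRestrictedContent [] [] (-1)
  let groups := if lineLengthRestrictedContent.isEmpty then r.1 else r.1 ++ [r.2]
  groups.foldl (fun st g => (st.1 ++ [(pvRender g).1], st.2 ++ [(pvRender g).2])) ([], [])

-- ===== PRECONDITION & SPEC =====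
def Spec_setLinesPerSlideRestriction (lineLengthRestrictedContent : List (List String)) (maxLinesPerSlide : Int) (out : List String × List (List Int)) : Prop := out = setLinesPerSlideRestriction_alt lineLengthRestrictedContent maxLinesPerSlide
instance (lineLengthRestrictedContent : List (List String)) (maxLinesPerSlide : Int) (out : List String × List (List Int)) : Decidable (Spec_setLinesPerSlideRestriction lineLengthRestrictedContent maxLinesPerSlide out) := by unfold Spec_setLinesPerSlideRestriction; infer_instance

-- ===== CLAIM (what is proved, stated in full; the proofs are below) =====
def Claim_equal_setLinesPerSlideRestriction : Prop := ∀ (lineLengthRestrictedContent : List (List String)) (maxLinesPerSlide : Int), Dom_setLinesPerSlideRestriction lineLengthRestrictedContent maxLinesPerSlide → Spec_setLinesPerSlideRestriction lineLengthRestrictedContent maxLinesPerSlide (setLinesPerSlideRestriction lineLengthRestrictedContent maxLinesPerSlide)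

-- ===== LEMMAS AND PROOFS =====

-- render all groups, as the pair of maps
def pvF (gs : List (List (List String))) : List String × List (List Int) :=
  (gs.map (fun g => (pvRender g).1), gs.map (fun g => (pvRender g).2))

theorem pvIdx_append (l : List String) (s : String) :
    pvIdx (l ++ [s]) = ((pvIdx l).1 ++ [(pvIdx l).2], (pvIdx l).2 + (PySem.Str.len s : Int)) := by
  simp [pvIdx, List.foldl_append]

theorem pvFold_render (gs : List (List (List String))) (s1 : List String) (s2 : List (List Int)) :
    gs.foldl (fun st g => (st.1 ++ [(pvRender g).1], st.2 ++ [(pvRender g).2])) (s1, s2)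
      = (s1 ++ gs.map (fun g => (pvRender g).1), s2 ++ gs.map (fun g => (pvRender g).2)) := by
  induction gs generalizing s1 s2 with
  | nil => simp
  | cons g rest ih => simp [List.foldl_cons, ih]

theorem pvGroupB_snd_ne (m : Int) (xs : List (List String)) (groups : List (List (List String)))
    (curr : List (List String)) (l : Int) (h : curr ≠ [] ∨ xs ≠ []) :
    (pvGroupB m xs groups curr l).2 ≠ [] := by
  induction xs generalizing groups curr l with
  | nil =>
    simpa [pvGroupB] using h.resolve_right (by simp)
  | cons content rest ih =>
    simp only [pvGroupB]
    split
    · exact ih _ _ _ (Or.inl (by simp))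
    · exact ih _ _ _ (Or.inl (by simp))

theorem pvMain (m : Int) (xs : List (List String)) (groups : List (List (List String)))
    (curr : List (List String)) (currLines : Int) :
    pvLoopA m xs (pvF groups).1 (pvF groups).2 currLines
        (pvIdx (curr.map (PySem.Str.join ""))).2
        (curr.map (PySem.Str.join ""))
        (pvIdx (curr.map (PySem.Str.join ""))).1
      = (if (pvGroupB m xs groups curr currLines).2 = []
          then pvF (pvGroupB m xs groups curr currLines).1
          else pvF ((pvGroupB m xs groups curr currLines).1 ++ [(pvGroupB m xs groups curr currLines).2])) := by
  induction xs generalizing groups curr currLines with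
  | nil =>
    by_cases hc : curr = []
    · subst hc; simp [pvLoopA, pvGroupB]
    · have hne : (curr.map (PySem.Str.join "")).length > 0 := by
        simpa [List.length_pos_iff] using hc
      simp only [pvLoopA, pvGroupB, if_pos hne, if_neg hc, pvF, pvRender, List.map_append,
        List.map_cons, List.map_nil]
    | cons content rest ih =>
    simp only [pvLoopA, pvGroupB]
    split
    · -- append branch
      have h1 : curr.map (PySem.Str.join "") ++ [PySem.Str.join "" content]
          = (curr ++ [content]).map (PySem.Str.join "") := by simp
      rw [show (pvIdx (curr.map (PySem.Str.join ""))).1 ++ [(pvIdx (curr.map (PySem.Str.join ""))).2]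
            = (pvIdx ((curr ++ [content]).map (PySem.Str.join ""))).1 by
          simp [pvIdx_append],
        show (pvIdx (curr.map (PySem.Str.join ""))).2 + (PySem.Str.len (PySem.Str.join "" content) : Int)
            = (pvIdx ((curr ++ [content]).map (PySem.Str.join ""))).2 by
          simp [pvIdx_append],
        h1]
      exact ih groups (curr ++ [content]) _
    · -- flush branch
      have h2 : (PySem.Str.join "" (curr.map (PySem.Str.join "")), (pvIdx (curr.map (PySem.Str.join ""))).1)
          = pvRender curr := rfl
      have h3 : [PySem.Str.join "" content] = [content].map (PySem.Str.join "") := by simp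
      have h4 : pvIdx ([content].map (PySem.Str.join "")) =
          ([0], (PySem.Str.len (PySem.Str.join "" content) : Int)) := by
        simp only [pvIdx, List.map_cons, List.map_nil, List.foldl_cons, List.foldl_nil,
          List.nil_append, zero_add]
      rw [show (pvF groups).1 ++ [PySem.Str.join "" (curr.map (PySem.Str.join ""))]
            = (pvF (groups ++ [curr])).1 by simp [pvF, pvRender],
        show (pvF groups).2 ++ [(pvIdx (curr.map (PySem.Str.join ""))).1]
            = (pvF (groups ++ [curr])).2 by simp [pvF, pvRender],
        show ((PySem.Str.len (PySem.Str.join "" content) : Int))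
            = (pvIdx ([content].map (PySem.Str.join ""))).2 by rw [h4],
        show ([0] : List Int) = (pvIdx ([content].map (PySem.Str.join ""))).1 by rw [h4],
        h3]
      exact ih (groups ++ [curr]) [content] _

-- ===== VERDICT (by name: the statement is the Claim_ definition above) =====
theorem setLinesPerSlideRestriction_spec : Claim_equal_setLinesPerSlideRestriction := by
  intro xs m _
  unfold Spec_setLinesPerSlideRestriction setLinesPerSlideRestriction setLinesPerSlideRestriction_alt
  have hmain := pvMain m xs [] [] (-1)
  simp only [pvF, pvIdx, List.map_nil, List.foldl_nil] at hmain
  rw [hmain, pvFold_render]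
  cases xs with
  | nil => simp [pvGroupB]
  | cons c rest =>
    have hne : (pvGroupB m (c :: rest) [] [] (-1)).2 ≠ [] :=
      pvGroupB_snd_ne m (c :: rest) [] [] (-1) (Or.inr (by simp))
    simp [if_neg hne]
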